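-- pv_equiv track=rewrite | github.com/Gilbertus-master/personal-ai | app/ingestion/email/parser.py | strip_mime_attachment_blocks
-- ===== SOURCE A (Python) =====
-- def strip_mime_attachment_blocks(text: str) -> str:
--     if not text:
--         return ""
--
--     lines = text.splitlines()
--     out: list[str] = []
--
--     skip_mode = False
--     skipped_blank_streak = 0
--
--     for line in lines:
--         lower = line.lower().strip()
--
--         # start bloku załącznika / payloadu
--         if (
--             lower.startswith("content-type: application/")
--             or lower.startswith("content-type: image/")
--             or "filename=" in lower
--             or "filename*=" in lower
--             or lower.startswith("content-transfer-encoding: base64")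
--         ):
--             skip_mode = True
--             skipped_blank_streak = 0
--             continue
--
--         if skip_mode:
--             # jeśli trafiliśmy na boundary nowej części, kończymy skip
--             if lower.startswith("--boundary-") or lower.startswith("----boundary-"):
--                 skip_mode = False
--                 continue
--
--             # jeśli po serii pustych linii wraca zwykły tekst, kończymy skip
--             if not lower:
--                 skipped_blank_streak += 1
--                 if skipped_blank_streak >= 2:
--                     skip_mode = False
--                 continue
--
--             # nadal pomijamy payload
--             continue
--
--         out.append(line)
--
--     return "\n".join(out)
-- ===== SOURCE B (Python) =====
-- def _is_start(lower: str) -> bool: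
--     return (
--         lower.startswith("content-type: application/")
--         or lower.startswith("content-type: image/")
--         or "filename=" in lower
--         or "filename*=" in lower
--         or lower.startswith("content-transfer-encoding: base64")
--     )
--
--
-- def _after_terminator(chunk: list[str]) -> list[str]:
--     # A chunk contains no attachment-start lines.  Drop its payload prefix:
--     # everything up to and including the first boundary line or the second
--     # blank line; keep the suffix.  No terminator -> drop the whole chunk.
--     blanks = 0
--     for i, line in enumerate(chunk):
--         low = line.lower().strip()
--         if low.startswith("--boundary-") or low.startswith("----boundary-"):
--             return chunk[i + 1:]
--         if not low:
--             blanks += 1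
--             if blanks >= 2:
--                 return chunk[i + 1:]
--     return []
--
--
-- def strip_mime_attachment_blocks(text: str) -> str:
--     # Stage 1: split the lines into chunks at attachment-start lines
--     # (the start lines themselves are dropped).
--     chunks: list[list[str]] = [[]]
--     for line in text.splitlines():
--         if _is_start(line.lower().strip()):
--             chunks.append([])
--         else:
--             chunks[-1].append(line)
--     # Stage 2: the leading chunk is kept whole; every later chunk is an
--     # attachment payload and keeps only what follows its terminator.
--     out = list(chunks[0])
--     for chunk in chunks[1:]:
--         out.extend(_after_terminator(chunk))
--     return "\n".join(out)
-- ===== Notes on version B (the rewrite author's own statement) =====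
-- stated objective: alternative
-- what changed: Replaced A's single stateful pass (skip_mode flag plus blank-streak counter threaded through one loop) by two staged passes: first split the lines into chunks at attachment-start lines, then keep the first chunk whole and, for each later chunk, keep only the suffix after its terminator (first boundary line or second blank line).
import Mathlib
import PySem

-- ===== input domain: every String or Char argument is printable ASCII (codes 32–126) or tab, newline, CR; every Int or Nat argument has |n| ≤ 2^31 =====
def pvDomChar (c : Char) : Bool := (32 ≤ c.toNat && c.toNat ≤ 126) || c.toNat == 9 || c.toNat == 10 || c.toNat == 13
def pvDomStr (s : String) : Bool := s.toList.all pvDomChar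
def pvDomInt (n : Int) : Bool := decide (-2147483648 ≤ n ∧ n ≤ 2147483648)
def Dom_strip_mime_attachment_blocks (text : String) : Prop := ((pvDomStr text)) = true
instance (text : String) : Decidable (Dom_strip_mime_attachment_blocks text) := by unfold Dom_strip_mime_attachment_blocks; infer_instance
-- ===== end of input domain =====

-- B replaces A's single stateful pass by two staged passes: split the lines into
-- chunks at attachment-start lines, then drop each later chunk's payload prefix
-- (objective: alternative decomposition, same cost).

-- ===== PORT A =====
-- A-side helper: the inline attachment-start condition of A's loop body
def pvStartA (lower : String) : Bool :=
  PySem.Str.startswith lower "content-type: application/" ||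
  PySem.Str.startswith lower "content-type: image/" ||
  PySem.Str.isIn "filename=" lower ||
  PySem.Str.isIn "filename*=" lower ||
  PySem.Str.startswith lower "content-transfer-encoding: base64"

-- A's loop body, state = (out, skip_mode, skipped_blank_streak)
def pvStepA (st : List String × Bool × Int) (line : String) : List String × Bool × Int :=
  let out := st.1
  let skip := st.2.1
  let streak := st.2.2
  let lower := PySem.Str.strip (PySem.Str.lower line)
  if pvStartA lower then (out, true, 0)
  else if skip then
    if PySem.Str.startswith lower "--boundary-" || PySem.Str.startswith lower "----boundary-" then
      (out, false, streak)
    else if lower == "" then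
      let streak' := streak + 1
      if streak' ≥ 2 then (out, false, streak') else (out, true, streak')
    else (out, true, streak)
  else (out ++ [line], skip, streak)

def strip_mime_attachment_blocks (text : String) : String :=
  if text == "" then ""
  else
    PySem.Str.join "\n" ((PySem.Str.splitlines text).foldl pvStepA ([], false, 0)).1

-- ===== PORT B =====
def pvIsStart (lower : String) : Bool :=
  PySem.Str.startswith lower "content-type: application/" ||
  PySem.Str.startswith lower "content-type: image/" ||
  PySem.Str.isIn "filename=" lower ||
  PySem.Str.isIn "filename*=" lower ||
  PySem.Str.startswith lower "content-transfer-encoding: base64"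

def pvLow (l : String) : String := PySem.Str.strip (PySem.Str.lower l)

-- Stage 1: split the lines into chunks at attachment-start lines (start lines dropped)
def pvSplit : List String → List (List String)
  | [] => [[]]
  | l :: r =>
    if pvIsStart (pvLow l) then [] :: pvSplit r
    else
      match pvSplit r with
      | c :: cs => (l :: c) :: cs
      | [] => [[l]]

-- Stage 2 helper: drop a chunk's payload prefix up to and including its terminator
-- (first boundary line, or the blank line making the chunk's blank count reach 2);
-- no terminator drops the whole chunk.  `blanks` counts blank lines seen so far.
def pvAfterTerminator : Int → List String → List String
  | _, [] => []
  | blanks, l :: r =>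
    if PySem.Str.startswith (pvLow l) "--boundary-" || PySem.Str.startswith (pvLow l) "----boundary-" then r
    else if pvLow l == "" then
      (if blanks + 1 ≥ 2 then r else pvAfterTerminator (blanks + 1) r)
    else pvAfterTerminator blanks r

def strip_mime_attachment_blocks_alt (text : String) : String :=
  let chunks := pvSplit (PySem.Str.splitlines text)
  PySem.Str.join "\n" (chunks.headI ++ chunks.tail.flatMap (pvAfterTerminator 0))

-- ===== PRECONDITION & SPEC =====
def Spec_strip_mime_attachment_blocks (text : String) (out : String) : Prop := out = strip_mime_attachment_blocks_alt text
instance (text : String) (out : String) : Decidable (Spec_strip_mime_attachment_blocks text out) := by unfold Spec_strip_mime_attachment_blocks; infer_instance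

-- ===== CLAIM (what is proved, stated in full; the proofs are below) =====
def Claim_equal_strip_mime_attachment_blocks : Prop := ∀ (text : String), Dom_strip_mime_attachment_blocks text → Spec_strip_mime_attachment_blocks text (strip_mime_attachment_blocks text)

-- ===== LEMMAS AND PROOFS =====

-- Proof-only intermediate semantics of A's two modes (not used by either port)
mutual
  def pvOuterP : List String → List String
    | [] => []
    | l :: rest =>
      if pvIsStart (pvLow l) then pvConsumeP 0 rest
      else l :: pvOuterP rest
  def pvConsumeP : Int → List String → List String
    | _, [] => []
    | streak, l :: rest =>
      if pvIsStart (pvLow l) then pvConsumeP 0 rest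
      else if PySem.Str.startswith (pvLow l) "--boundary-" || PySem.Str.startswith (pvLow l) "----boundary-" then
        pvOuterP rest
      else if pvLow l == "" then
        (if streak + 1 ≥ 2 then pvOuterP rest else pvConsumeP (streak + 1) rest)
      else pvConsumeP streak rest
end

lemma pvSplit_ne_nil (ls : List String) : ∃ c cs, pvSplit ls = c :: cs := by
  cases ls with
  | nil => exact ⟨[], [], rfl⟩
  | cons l r =>
    unfold pvSplit
    split_ifs
    · exact ⟨[], pvSplit r, rfl⟩
    · cases h : pvSplit r with
      | nil => exact ⟨[l], [], by simp⟩
      | cons c cs => exact ⟨l :: c, cs, by simp⟩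

-- A's step function written with B's helpers (definitionally equal)
lemma pvStepA_eq (out : List String) (skip : Bool) (streak : Int) (l : String) :
    pvStepA (out, skip, streak) l =
      (if pvIsStart (pvLow l) then (out, true, (0 : Int))
       else if skip then
         if PySem.Str.startswith (pvLow l) "--boundary-" || PySem.Str.startswith (pvLow l) "----boundary-" then
           (out, false, streak)
         else if pvLow l == "" then
           (if streak + 1 ≥ 2 then (out, false, streak + 1) else (out, true, streak + 1))
         else (out, true, streak)
       else (out ++ [l], skip, streak)) := rfl

-- A's fold from either mode equals the corresponding phase of the proof semantics.
lemma pvFold_eq (ls : List String) :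
    (∀ out k, (List.foldl pvStepA (out, false, k) ls).1 = out ++ pvOuterP ls) ∧
    (∀ out s, (List.foldl pvStepA (out, true, s) ls).1 = out ++ pvConsumeP s ls) := by
  induction ls with
  | nil => simp [pvOuterP, pvConsumeP]
  | cons l rest ih =>
    refine ⟨fun out k => ?_, fun out s => ?_⟩
    · rw [List.foldl_cons, pvStepA_eq]
      unfold pvOuterP
      by_cases h1 : pvIsStart (pvLow l) = true
      · rw [if_pos h1, if_pos h1]
        exact ih.2 out 0
      · rw [if_neg h1, if_neg h1]
        simp only [Bool.false_eq_true, if_false]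
        rw [ih.1]
        simp
    · rw [List.foldl_cons, pvStepA_eq]
      unfold pvConsumeP
      simp only [if_true]
      split_ifs with h1 h2 h3 h4
      · exact ih.2 out 0
      · exact ih.1 out s
      · exact ih.1 out (s + 1)
      · exact ih.2 out (s + 1)
      · exact ih.2 out s

-- The proof semantics equals B's staged (split-then-drop) computation.
lemma pvPhase_eq (ls : List String) :
    pvOuterP ls = (pvSplit ls).headI ++ (pvSplit ls).tail.flatMap (pvAfterTerminator 0) ∧
    (∀ s, pvConsumeP s ls =
      pvAfterTerminator s (pvSplit ls).headI ++ (pvSplit ls).tail.flatMap (pvAfterTerminator 0)) := by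
  induction ls with
  | nil => simp [pvOuterP, pvConsumeP, pvSplit, pvAfterTerminator]
  | cons l rest ih =>
    obtain ⟨c, cs, hcs⟩ := pvSplit_ne_nil rest
    have hi1 : pvOuterP rest = c ++ cs.flatMap (pvAfterTerminator 0) := by
      have := ih.1; rwa [hcs] at this
    have hi2 : ∀ s, pvConsumeP s rest = pvAfterTerminator s c ++ cs.flatMap (pvAfterTerminator 0) := by
      intro s; have := ih.2 s; rwa [hcs] at this
    by_cases h1 : pvIsStart (pvLow l) = true
    · have hsplit : pvSplit (l :: rest) = [] :: c :: cs := by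
        rw [pvSplit, if_pos h1, hcs]
      have houter : pvOuterP (l :: rest) = pvConsumeP 0 rest := by
        rw [pvOuterP, if_pos h1]
      have hcons : ∀ s, pvConsumeP s (l :: rest) = pvConsumeP 0 rest := by
        intro s; rw [pvConsumeP, if_pos h1]
      refine ⟨?_, fun s => ?_⟩
      · rw [houter, hi2 0, hsplit]
        simp
      · rw [hcons s, hi2 0, hsplit]
        simp [pvAfterTerminator]
    · have hsplit : pvSplit (l :: rest) = (l :: c) :: cs := by
        rw [pvSplit, if_neg h1, hcs]
      refine ⟨?_, fun s => ?_⟩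
      · have houter : pvOuterP (l :: rest) = l :: pvOuterP rest := by
          rw [pvOuterP, if_neg h1]
        rw [houter, hi1, hsplit]
        simp
      · have hstep : pvConsumeP s (l :: rest) =
            (if PySem.Str.startswith (pvLow l) "--boundary-" || PySem.Str.startswith (pvLow l) "----boundary-" then
               pvOuterP rest
             else if pvLow l == "" then
               (if s + 1 ≥ 2 then pvOuterP rest else pvConsumeP (s + 1) rest)
             else pvConsumeP s rest) := by
          rw [pvConsumeP, if_neg h1]
        have hdrop : pvAfterTerminator s (l :: c) =
            (if PySem.Str.startswith (pvLow l) "--boundary-" || PySem.Str.startswith (pvLow l) "----boundary-" then c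
             else if pvLow l == "" then
               (if s + 1 ≥ 2 then c else pvAfterTerminator (s + 1) c)
             else pvAfterTerminator s c) := rfl
        rw [hstep, hsplit, List.headI_cons, List.tail_cons, hdrop]
        split_ifs with h2 h3 h4
        · exact hi1
        · exact hi1
        · exact hi2 (s + 1)
        · exact hi2 s

-- ===== VERDICT (by name: the statement is the Claim_ definition above) =====
theorem strip_mime_attachment_blocks_spec : Claim_equal_strip_mime_attachment_blocks := by
  intro text _
  unfold Spec_strip_mime_attachment_blocks strip_mime_attachment_blocks strip_mime_attachment_blocks_alt
  split_ifs with h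
  · rw [beq_iff_eq] at h
    subst h
    decide
  · rw [(pvFold_eq (PySem.Str.splitlines text)).1 [] 0, (pvPhase_eq (PySem.Str.splitlines text)).1]
    simp
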